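-- pv_equiv track=rewrite | github.com/vorzdesigns/VimTag | main.py | parse_edited_metadata
-- ===== SOURCE A (Python) =====
-- EDITABLE_TAGS = ['title', 'artist', 'album', 'genre', 'tracknumber', 'date']
--
-- METADATA_BLOCK_START = "# --- Metadata ---"
--
-- METADATA_BLOCK_END = "# --- End Metadata ---"
--
-- FILE_PATH_PREFIX = "# File: "
--
-- def parse_edited_metadata(edited_content_str):
--     """
--     Parses the string content from Vim back into a list of metadata dictionaries.
--     """
--     updated_songs_metadata = []
--     current_song_info = None
--     lines = edited_content_str.splitlines()
--
--     for line in lines: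
--         line = line.strip()
--         if line.startswith(FILE_PATH_PREFIX):
--             if current_song_info: # Save previous song if any
--                 updated_songs_metadata.append(current_song_info)
--             current_song_info = {'filepath': line[len(FILE_PATH_PREFIX):].strip()}
--         elif line == METADATA_BLOCK_START and current_song_info:
--             continue # Just a marker
--         elif line == METADATA_BLOCK_END and current_song_info:
--             if current_song_info: # Finalize current song
--                 updated_songs_metadata.append(current_song_info)
--                 current_song_info = None
--         elif ':' in line and current_song_info:
--             if line.startswith("#"): # Skip comment lines within metadata block if any
--                 continue
--             key, value = line.split(':', 1)
--             key = key.strip()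
--             value = value.strip()
--             if key in EDITABLE_TAGS:
--                 current_song_info[key] = value if value else None # Store empty as None
--
--     if current_song_info: # Catch the last song if file doesn't end with METADATA_BLOCK_END properly
--         updated_songs_metadata.append(current_song_info)
--
--     return updated_songs_metadata
-- ===== SOURCE B (Python) =====
-- EDITABLE_TAGS = ['title', 'artist', 'album', 'genre', 'tracknumber', 'date']
-- METADATA_BLOCK_START = "# --- Metadata ---"
-- METADATA_BLOCK_END = "# --- End Metadata ---"
-- FILE_PATH_PREFIX = "# File: "
--
--
-- def _song(header, body):
--     song = {'filepath': header[len(FILE_PATH_PREFIX):].strip()}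
--     for line in body:
--         if line == METADATA_BLOCK_END:
--             break
--         if ':' not in line or line.startswith('#'):
--             continue
--         key, value = line.split(':', 1)
--         key = key.strip()
--         value = value.strip()
--         if key in EDITABLE_TAGS:
--             song[key] = value if value else None
--     return song
--
--
-- def parse_edited_metadata(edited_content_str):
--     lines = [l.strip() for l in edited_content_str.splitlines()]
--     # cut into (header, body) segments at each "# File: " line;
--     # anything before the first header is ignored
--     rest = lines
--     while rest and not rest[0].startswith(FILE_PATH_PREFIX):
--         rest = rest[1:]
--     segments = []
--     while rest:
--         header, rest = rest[0], rest[1:]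
--         body = []
--         while rest and not rest[0].startswith(FILE_PATH_PREFIX):
--             body.append(rest[0])
--             rest = rest[1:]
--         segments.append((header, body))
--     return [_song(h, b) for (h, b) in segments]
-- ===== Notes on version B (the rewrite author's own statement) =====
-- stated objective: alternative
-- what changed: Replaces A's single-pass state machine (optional current-dict carried through every line plus a final flush) by a two-phase decomposition: first cut the stripped lines into (header, body) segments at each file-header line, then build each song dict independently from its segment, breaking at the End-Metadata marker.
import Mathlib
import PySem

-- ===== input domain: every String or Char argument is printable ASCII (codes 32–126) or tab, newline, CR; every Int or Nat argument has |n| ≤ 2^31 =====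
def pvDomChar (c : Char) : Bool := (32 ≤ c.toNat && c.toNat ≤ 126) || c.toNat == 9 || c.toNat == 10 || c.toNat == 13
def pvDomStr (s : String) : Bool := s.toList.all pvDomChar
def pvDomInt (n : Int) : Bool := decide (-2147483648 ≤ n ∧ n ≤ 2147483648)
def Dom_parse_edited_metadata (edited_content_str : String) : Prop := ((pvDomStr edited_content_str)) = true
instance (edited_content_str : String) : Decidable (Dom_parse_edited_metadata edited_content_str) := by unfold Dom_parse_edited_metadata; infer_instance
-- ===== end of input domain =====

-- B replaces A's line-by-line state machine by a segment-cut-then-parse decomposition; same results, same cost (objective: alternative).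

-- ===== PORT A =====
-- state: (updated_songs_metadata, current_song_info)
def pvAStepStripped
    (st : List (PySem.Dict String (Option String)) × Option (PySem.Dict String (Option String)))
    (line : String) :
    List (PySem.Dict String (Option String)) × Option (PySem.Dict String (Option String)) :=
  if PySem.Str.startswith line "# File: " then
    ((match st.2 with | some d => st.1 ++ [d] | none => st.1),
     some ((PySem.Dict.empty).insert "filepath"
        (some (PySem.Str.strip (PySem.Str.slice line (some 8) none)))))
  else if line == "# --- Metadata ---" && st.2.isSome then
    st
  else if line == "# --- End Metadata ---" && st.2.isSome then
    (match st.2 with | some d => (st.1 ++ [d], none) | none => st)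
  else if PySem.Str.isIn ":" line && st.2.isSome then
    if PySem.Str.startswith line "#" then st
    else
      match st.2, PySem.Str.splitMax? line ":" 1 with
      | some d, some (k :: v :: _) =>
          let key := PySem.Str.strip k
          let value := PySem.Str.strip v
          if ["title", "artist", "album", "genre", "tracknumber", "date"].contains key then
            (st.1, some (d.insert key (if value == "" then none else some value)))
          else st
      | _, _ => st
  else st

-- the loop body begins with 'line = line.strip()'
def pvAStep
    (st : List (PySem.Dict String (Option String)) × Option (PySem.Dict String (Option String)))
    (line : String) :
    List (PySem.Dict String (Option String)) × Option (PySem.Dict String (Option String)) :=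
  pvAStepStripped st (PySem.Str.strip line)

-- the final 'if current_song_info: updated_songs_metadata.append(current_song_info)'
def pvAFinal
    (st : List (PySem.Dict String (Option String)) × Option (PySem.Dict String (Option String))) :
    List (PySem.Dict String (Option String)) :=
  match st.2 with | some d => st.1 ++ [d] | none => st.1

def parse_edited_metadata (edited_content_str : String) : List (List (String × Option String)) :=
  (pvAFinal ((PySem.Str.splitlines edited_content_str).foldl pvAStep ([], none))).map (·.items)

-- ===== PORT B =====
def pvIsHdr (l : String) : Bool := PySem.Str.startswith l "# File: "

-- the body loop of _song: break on the End marker, skip no-colon and comment lines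
def pvSongLoop : List String → PySem.Dict String (Option String) → PySem.Dict String (Option String)
  | [], d => d
  | l :: ls, d =>
    if l == "# --- End Metadata ---" then d
    else if !(PySem.Str.isIn ":" l) || PySem.Str.startswith l "#" then pvSongLoop ls d
    else
      match PySem.Str.splitMax? l ":" 1 with
      | some (k :: v :: _) =>
          let key := PySem.Str.strip k
          let value := PySem.Str.strip v
          pvSongLoop ls
            (if ["title", "artist", "album", "genre", "tracknumber", "date"].contains key then
              d.insert key (if value == "" then none else some value)
            else d)
      | _ => pvSongLoop ls d

def pvSong (header : String) (body : List String) : PySem.Dict String (Option String) :=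
  pvSongLoop body
    ((PySem.Dict.empty).insert "filepath"
      (some (PySem.Str.strip (PySem.Str.slice header (some 8) none))))

-- cut into (header, body) segments at each header line
def pvSegs : List String → List (String × List String)
  | [] => []
  | h :: ls =>
      (h, ls.takeWhile (fun l => !pvIsHdr l)) :: pvSegs (ls.dropWhile (fun l => !pvIsHdr l))
termination_by ls => ls.length
decreasing_by
  exact Nat.lt_succ_of_le (List.length_dropWhile_le (fun l => !pvIsHdr l) ls)

def parse_edited_metadata_alt (edited_content_str : String) : List (List (String × Option String)) :=
  let lines := (PySem.Str.splitlines edited_content_str).map PySem.Str.strip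
  let rest := lines.dropWhile (fun l => !pvIsHdr l)
  (pvSegs rest).map (fun p => (pvSong p.1 p.2).items)

-- ===== PRECONDITION & SPEC =====
def Spec_parse_edited_metadata (edited_content_str : String) (out : List (List (String × Option String))) : Prop := out = parse_edited_metadata_alt edited_content_str
instance (edited_content_str : String) (out : List (List (String × Option String))) : Decidable (Spec_parse_edited_metadata edited_content_str out) := by unfold Spec_parse_edited_metadata; infer_instance

-- ===== CLAIM (what is proved, stated in full; the proofs are below) =====
def Claim_equal_parse_edited_metadata : Prop := ∀ (edited_content_str : String), Dom_parse_edited_metadata edited_content_str → Spec_parse_edited_metadata edited_content_str (parse_edited_metadata edited_content_str)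

-- ===== LEMMAS AND PROOFS =====

-- what A's loop still produces from state (·, cur), phrased in B's vocabulary
def pvTail (ls : List String) :
    Option (PySem.Dict String (Option String)) → List (PySem.Dict String (Option String))
  | none => (pvSegs (ls.dropWhile (fun l => !pvIsHdr l))).map (fun p => pvSong p.1 p.2)
  | some d =>
      pvSongLoop (ls.takeWhile (fun l => !pvIsHdr l)) d ::
        (pvSegs (ls.dropWhile (fun l => !pvIsHdr l))).map (fun p => pvSong p.1 p.2)

-- the starting dict {'filepath': …} built from a (stripped) header line
def pvInit (l : String) : PySem.Dict String (Option String) :=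
  (PySem.Dict.empty).insert "filepath"
    (some (PySem.Str.strip (PySem.Str.slice l (some 8) none)))

-- the effect of one key:value line on the current dict
def pvUpd (l : String) (d : PySem.Dict String (Option String)) : PySem.Dict String (Option String) :=
  match PySem.Str.splitMax? l ":" 1 with
  | some (k :: v :: _) =>
      let key := PySem.Str.strip k
      let value := PySem.Str.strip v
      if ["title", "artist", "album", "genre", "tracknumber", "date"].contains key then
        d.insert key (if value == "" then none else some value)
      else d
  | _ => d

theorem pvStep_none_hdr (acc : List (PySem.Dict String (Option String))) (l : String)
    (hH : PySem.Str.startswith l "# File: " = true) :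
    pvAStepStripped (acc, none) l = (acc, some (pvInit l)) := by
  simp at hH
  simp [pvAStepStripped, pvInit, hH]

theorem pvStep_none_other (acc : List (PySem.Dict String (Option String))) (l : String)
    (hH : PySem.Str.startswith l "# File: " = false) :
    pvAStepStripped (acc, none) l = (acc, none) := by
  simp at hH
  simp [pvAStepStripped, hH]

theorem pvStep_some_hdr (acc : List (PySem.Dict String (Option String)))
    (d : PySem.Dict String (Option String)) (l : String)
    (hH : PySem.Str.startswith l "# File: " = true) :
    pvAStepStripped (acc, some d) l = (acc ++ [d], some (pvInit l)) := by
  simp at hH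
  simp [pvAStepStripped, pvInit, hH]

theorem pvStep_some_start (acc : List (PySem.Dict String (Option String)))
    (d : PySem.Dict String (Option String)) :
    pvAStepStripped (acc, some d) "# --- Metadata ---" = (acc, some d) := by
  simp [pvAStepStripped]
  decide

theorem pvStep_some_end (acc : List (PySem.Dict String (Option String)))
    (d : PySem.Dict String (Option String)) :
    pvAStepStripped (acc, some d) "# --- End Metadata ---" = (acc ++ [d], none) := by
  simp [pvAStepStripped]
  decide

theorem pvStep_some_comment (acc : List (PySem.Dict String (Option String)))
    (d : PySem.Dict String (Option String)) (l : String)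
    (hH : PySem.Str.startswith l "# File: " = false)
    (hS : (l == "# --- Metadata ---") = false)
    (hE : (l == "# --- End Metadata ---") = false)
    (hc : PySem.Str.startswith l "#" = true) :
    pvAStepStripped (acc, some d) l = (acc, some d) := by
  simp at hH hc
  simp [pvAStepStripped, hH, hS, hE, hc]

theorem pvStep_some_colon (acc : List (PySem.Dict String (Option String)))
    (d : PySem.Dict String (Option String)) (l : String)
    (hH : PySem.Str.startswith l "# File: " = false)
    (hS : (l == "# --- Metadata ---") = false)
    (hE : (l == "# --- End Metadata ---") = false)
    (hC : PySem.Str.isIn ":" l = true)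
    (hc : PySem.Str.startswith l "#" = false) :
    pvAStepStripped (acc, some d) l = (acc, some (pvUpd l d)) := by
  simp at hH hS hE hC hc
  simp only [pvAStepStripped, pvUpd]
  simp [hH, hS, hE, hC, hc]
  cases hsp : PySem.Str.splitMax? l ":" 1 with
  | none => simp
  | some parts =>
    cases parts with
    | nil => simp
    | cons k rest =>
      cases rest with
      | nil => simp
      | cons v rest2 => dsimp only; split_ifs <;> rfl

theorem pvStep_some_plain (acc : List (PySem.Dict String (Option String)))
    (d : PySem.Dict String (Option String)) (l : String)
    (hH : PySem.Str.startswith l "# File: " = false)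
    (hS : (l == "# --- Metadata ---") = false)
    (hE : (l == "# --- End Metadata ---") = false)
    (hC : PySem.Str.isIn ":" l = false) :
    pvAStepStripped (acc, some d) l = (acc, some d) := by
  simp at hH hC
  simp [pvAStepStripped, hH, hS, hE, hC]

theorem pvLoop_skip (ls : List String) (d : PySem.Dict String (Option String)) (l : String)
    (hE : (l == "# --- End Metadata ---") = false)
    (h : PySem.Str.isIn ":" l = false ∨ PySem.Str.startswith l "#" = true) :
    pvSongLoop (l :: ls) d = pvSongLoop ls d := by
  rcases h with h | h <;> simp at h <;> simp [pvSongLoop, hE, h]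

theorem pvLoop_upd (ls : List String) (d : PySem.Dict String (Option String)) (l : String)
    (hE : (l == "# --- End Metadata ---") = false)
    (hC : PySem.Str.isIn ":" l = true)
    (hc : PySem.Str.startswith l "#" = false) :
    pvSongLoop (l :: ls) d = pvSongLoop ls (pvUpd l d) := by
  simp at hE hC hc
  simp only [pvSongLoop, pvUpd]
  simp [hE, hC, hc]
  cases hsp : PySem.Str.splitMax? l ":" 1 with
  | none => simp
  | some parts =>
    cases parts with
    | nil => simp
    | cons k rest =>
      cases rest with
      | nil => simp
      | cons v rest2 => simp

theorem pvKey (ls : List String) :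
    ∀ (acc : List (PySem.Dict String (Option String)))
      (cur : Option (PySem.Dict String (Option String))),
    pvAFinal (ls.foldl pvAStepStripped (acc, cur)) = acc ++ pvTail ls cur := by
  induction ls with
  | nil =>
    intro acc cur
    cases cur <;> simp [pvAFinal, pvTail, pvSegs, pvSongLoop]
  | cons l ls ih =>
    intro acc cur
    rw [List.foldl_cons]
    cases cur with
    | none =>
      by_cases hH : PySem.Str.startswith l "# File: " = true
      · have hI : pvIsHdr l = true := hH
        rw [pvStep_none_hdr acc l hH, ih]
        simp [pvTail, pvSegs, pvSong, pvInit, hI]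
      · replace hH : PySem.Str.startswith l "# File: " = false := by simpa using hH
        have hI : pvIsHdr l = false := hH
        rw [pvStep_none_other acc l hH, ih]
        simp [pvTail, hI]
    | some d =>
      by_cases hH : PySem.Str.startswith l "# File: " = true
      · have hI : pvIsHdr l = true := hH
        rw [pvStep_some_hdr acc d l hH, ih]
        simp [pvTail, pvSegs, pvSong, pvInit, hI, pvSongLoop]
      · replace hH : PySem.Str.startswith l "# File: " = false := by simpa using hH
        have hI : pvIsHdr l = false := hH
        by_cases hS : (l == "# --- Metadata ---") = true
        · replace hS : l = "# --- Metadata ---" := by simpa using hS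
          subst hS
          rw [pvStep_some_start, ih]
          simp only [pvTail, hI, List.takeWhile_cons, List.dropWhile_cons, Bool.not_false,
            if_true]
          rw [pvLoop_skip _ _ _ (by decide) (Or.inl (by decide))]
        · replace hS : (l == "# --- Metadata ---") = false := by simpa using hS
          by_cases hE : (l == "# --- End Metadata ---") = true
          · replace hE : l = "# --- End Metadata ---" := by simpa using hE
            subst hE
            rw [pvStep_some_end, ih]
            simp [pvTail, hI, pvSongLoop]
          · replace hE : (l == "# --- End Metadata ---") = false := by simpa using hE
            by_cases hC : PySem.Str.isIn ":" l = true
            · by_cases hc : PySem.Str.startswith l "#" = true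
              · rw [pvStep_some_comment acc d l hH hS hE hc, ih]
                simp only [pvTail, hI, List.takeWhile_cons, List.dropWhile_cons,
                  Bool.not_false, if_true]
                rw [pvLoop_skip _ _ _ hE (Or.inr hc)]
              · replace hc : PySem.Str.startswith l "#" = false := by simpa using hc
                rw [pvStep_some_colon acc d l hH hS hE hC hc, ih]
                simp only [pvTail, hI, List.takeWhile_cons, List.dropWhile_cons,
                  Bool.not_false, if_true]
                rw [pvLoop_upd _ _ _ hE hC hc]
            · replace hC : PySem.Str.isIn ":" l = false := by simpa using hC
              rw [pvStep_some_plain acc d l hH hS hE hC, ih]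
              simp only [pvTail, hI, List.takeWhile_cons, List.dropWhile_cons,
                Bool.not_false, if_true]
              rw [pvLoop_skip _ _ _ hE (Or.inl hC)]

-- ===== VERDICT (by name: the statement is the Claim_ definition above) =====
theorem parse_edited_metadata_spec : Claim_equal_parse_edited_metadata := by
  intro s _
  unfold Spec_parse_edited_metadata parse_edited_metadata parse_edited_metadata_alt
  have hmap : (PySem.Str.splitlines s).foldl pvAStep ([], none)
      = ((PySem.Str.splitlines s).map PySem.Str.strip).foldl pvAStepStripped ([], none) := by
    rw [List.foldl_map]
    rfl
  rw [hmap, pvKey]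
  simp [pvTail, pvSong]
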